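-- pv_equiv track=rewrite | github.com/aleksbrsc/Leetcode | 1534CountGoodTriplets.py | countGoodTriplets
-- ===== SOURCE A (Python) =====
-- def countGoodTriplets(arr, a, b, c):
--     """
--     :type arr: List[int]
--     :type a: int
--     :type b: int
--     :type c: int
--     :rtype: int
--     """
--     ans, i, j, k = 0, 0, 0, 0
--
--     while i < len(arr):
--         while j < len(arr):
--             while k < len(arr):
--                 if i < j < k and abs(arr[i] - arr[j]) <= a and abs(arr[j] - arr[k]) <= b and abs(arr[i] - arr[k]) <= c:
--                     ans += 1
--                 k += 1
--             k = 0
--             j += 1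
--         j = 0
--         i += 1
--
--     return ans
-- ===== SOURCE B (Python) =====
-- def _bisect_left(s, x):
--     lo, hi = 0, len(s)
--     while lo < hi:
--         mid = (lo + hi) // 2
--         if s[mid] < x:
--             lo = mid + 1
--         else:
--             hi = mid
--     return lo
--
--
-- def _bisect_right(s, x):
--     lo, hi = 0, len(s)
--     while lo < hi:
--         mid = (lo + hi) // 2
--         if s[mid] <= x:
--             lo = mid + 1
--         else:
--             hi = mid
--     return lo
--
--
-- def countGoodTriplets(arr, a, b, c):
--     # Per pair (j, k): count valid i < j by range-counting in a sorted prefix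
--     # of arr[:j] with binary search: O(n^2 log n) instead of O(n^3).
--     n = len(arr)
--     ans = 0
--     prefix = []  # sorted copy of arr[:j]
--     for j in range(n):
--         vj = arr[j]
--         for k in range(j + 1, n):
--             vk = arr[k]
--             if abs(vj - vk) <= b:
--                 lo = max(vj - a, vk - c)
--                 hi = min(vj + a, vk + c)
--                 if lo <= hi:
--                     ans += _bisect_right(prefix, hi) - _bisect_left(prefix, lo)
--         pos = _bisect_left(prefix, vj)
--         prefix = prefix[:pos] + [vj] + prefix[pos:]
--     return ans
-- ===== Notes on version B (the rewrite author's own statement) =====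
-- stated objective: faster
-- what changed: Replaces the triple nested scan over all index triples by a per-pair (j,k) range count of valid i in a sorted prefix of arr[:j] maintained incrementally, using hand-written binary search (bisect) for counting and insertion.
import Mathlib
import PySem

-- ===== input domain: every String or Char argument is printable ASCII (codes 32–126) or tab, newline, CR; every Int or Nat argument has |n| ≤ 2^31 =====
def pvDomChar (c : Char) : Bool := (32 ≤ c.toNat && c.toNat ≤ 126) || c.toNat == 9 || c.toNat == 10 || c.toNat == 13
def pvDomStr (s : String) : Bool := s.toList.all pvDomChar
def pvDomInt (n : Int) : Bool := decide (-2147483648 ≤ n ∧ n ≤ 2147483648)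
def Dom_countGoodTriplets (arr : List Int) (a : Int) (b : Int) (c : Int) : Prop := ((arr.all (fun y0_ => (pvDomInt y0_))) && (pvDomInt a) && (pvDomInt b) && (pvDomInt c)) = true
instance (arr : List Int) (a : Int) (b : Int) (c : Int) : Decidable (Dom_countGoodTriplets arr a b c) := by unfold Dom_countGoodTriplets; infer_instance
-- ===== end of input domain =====

-- B replaces A's triple nested scan by a per-pair (j,k) range count of valid i
-- in an incrementally maintained sorted prefix of arr[:j] via binary search.

-- ===== PORT A =====
-- the combined condition of A's innermost `if` (chained comparison + three abs tests)
def pvGoodA (arr : List Int) (a : Int) (b : Int) (c : Int) (i j k : Nat) : Bool :=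
  decide (i < j) && decide (j < k)
    && decide (|arr.getD i 0 - arr.getD j 0| ≤ a)
    && decide (|arr.getD j 0 - arr.getD k 0| ≤ b)
    && decide (|arr.getD i 0 - arr.getD k 0| ≤ c)

-- innermost `while k < len(arr)`
def pvLoopK (arr : List Int) (a : Int) (b : Int) (c : Int) (i j k : Nat) (ans : Int) : Int :=
  if k < arr.length then
    pvLoopK arr a b c i j (k + 1) (if pvGoodA arr a b c i j k then ans + 1 else ans)
  else ans
termination_by arr.length - k

-- middle `while j < len(arr)` (k is reset to 0 after the inner loop)
def pvLoopJ (arr : List Int) (a : Int) (b : Int) (c : Int) (i j : Nat) (ans : Int) : Int :=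
  if j < arr.length then
    pvLoopJ arr a b c i (j + 1) (pvLoopK arr a b c i j 0 ans)
  else ans
termination_by arr.length - j

-- outer `while i < len(arr)` (j is reset to 0 after the middle loop)
def pvLoopI (arr : List Int) (a : Int) (b : Int) (c : Int) (i : Nat) (ans : Int) : Int :=
  if i < arr.length then
    pvLoopI arr a b c (i + 1) (pvLoopJ arr a b c i 0 ans)
  else ans
termination_by arr.length - i

def countGoodTriplets (arr : List Int) (a : Int) (b : Int) (c : Int) : Int :=
  pvLoopI arr a b c 0 0

-- ===== PORT B =====
-- Source B's hand-written _bisect_left/_bisect_right are exactly PySem.List.bisectLeft/bisectRight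
-- (the same lo/hi while loop); prefix[:pos] + [vj] + prefix[pos:] is take/cons/drop.
def countGoodTriplets_alt (arr : List Int) (a : Int) (b : Int) (c : Int) : Int :=
  let n := arr.length
  ((List.range n).foldl (fun (st : Int × List Int) j =>
      let pre := st.2
      let vj := arr.getD j 0
      let ans := (List.range' (j + 1) (n - (j + 1))).foldl (fun s k =>
          let vk := arr.getD k 0
          if |vj - vk| ≤ b then
            let lo := max (vj - a) (vk - c)
            let hi := min (vj + a) (vk + c)
            if lo ≤ hi then
              s + ((PySem.List.bisectRight pre hi : Int) - (PySem.List.bisectLeft pre lo : Int))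
            else s
          else s) st.1
      let pos := PySem.List.bisectLeft pre vj
      (ans, pre.take pos ++ vj :: pre.drop pos)) ((0 : Int), ([] : List Int))).1

-- ===== PRECONDITION & SPEC =====
def Spec_countGoodTriplets (arr : List Int) (a : Int) (b : Int) (c : Int) (out : Int) : Prop := out = countGoodTriplets_alt arr a b c
instance (arr : List Int) (a : Int) (b : Int) (c : Int) (out : Int) : Decidable (Spec_countGoodTriplets arr a b c out) := by unfold Spec_countGoodTriplets; infer_instance

-- ===== CLAIM (what is proved, stated in full; the proofs are below) =====
def Claim_equal_countGoodTriplets : Prop := ∀ (arr : List Int) (a : Int) (b : Int) (c : Int), Dom_countGoodTriplets arr a b c → Spec_countGoodTriplets arr a b c (countGoodTriplets arr a b c)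

-- ===== LEMMAS AND PROOFS =====

-- the contribution of one index triple in A, as an integer
def pvInd (arr : List Int) (a b c : Int) (i j k : Nat) : Int :=
  if pvGoodA arr a b c i j k then 1 else 0

-- A's per-pair (j,k) contribution, rephrased as a count over the true prefix arr[:j]
def pvBterm (arr : List Int) (a b c : Int) (j k : Nat) : Int :=
  if |arr.getD j 0 - arr.getD k 0| ≤ b then
    ((arr.take j).countP (fun v =>
      decide (max (arr.getD j 0 - a) (arr.getD k 0 - c) ≤ v) &&
      decide (v ≤ min (arr.getD j 0 + a) (arr.getD k 0 + c))) : Int)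
  else 0

-- the step function of B's outer fold (definitionally the lambda in countGoodTriplets_alt)
def pvStep (arr : List Int) (a b c : Int) (st : Int × List Int) (j : Nat) : Int × List Int :=
  let pre := st.2
  let vj := arr.getD j 0
  let ans := (List.range' (j + 1) (arr.length - (j + 1))).foldl (fun s k =>
      let vk := arr.getD k 0
      if |vj - vk| ≤ b then
        let lo := max (vj - a) (vk - c)
        let hi := min (vj + a) (vk + c)
        if lo ≤ hi then
          s + ((PySem.List.bisectRight pre hi : Int) - (PySem.List.bisectLeft pre lo : Int))
        else s
      else s) st.1
  let pos := PySem.List.bisectLeft pre vj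
  (ans, pre.take pos ++ vj :: pre.drop pos)

theorem alt_eq_fold (arr : List Int) (a b c : Int) :
    countGoodTriplets_alt arr a b c
      = ((List.range arr.length).foldl (pvStep arr a b c) ((0 : Int), ([] : List Int))).1 := rfl

-- ---------- A-side characterization: three nested while loops are a triple sum ----------

theorem loopK_eq (arr : List Int) (a b c : Int) (i j : Nat) :
    ∀ k ans, pvLoopK arr a b c i j k ans
      = ans + ∑ kk ∈ Finset.Ico k arr.length, pvInd arr a b c i j kk := by
  intro k ans
  fun_induction pvLoopK arr a b c i j k ans with
  | case1 k ans h ih =>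
      simp only [dite_eq_ite] at ih
      rw [ih, Finset.sum_eq_sum_Ico_succ_bot h]
      unfold pvInd; split <;> ring
  | case2 k ans h =>
      rw [Finset.Ico_eq_empty (by omega), Finset.sum_empty, add_zero]

theorem loopJ_eq (arr : List Int) (a b c : Int) (i : Nat) :
    ∀ j ans, pvLoopJ arr a b c i j ans
      = ans + ∑ jj ∈ Finset.Ico j arr.length, ∑ k ∈ Finset.range arr.length, pvInd arr a b c i jj k := by
  intro j ans
  fun_induction pvLoopJ arr a b c i j ans with
  | case1 j ans h ih =>
      rw [ih, loopK_eq, Finset.sum_eq_sum_Ico_succ_bot h]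
      rw [Finset.range_eq_Ico]; ring
  | case2 j ans h =>
      rw [Finset.Ico_eq_empty (by omega), Finset.sum_empty, add_zero]

theorem loopI_eq (arr : List Int) (a b c : Int) :
    ∀ i ans, pvLoopI arr a b c i ans
      = ans + ∑ ii ∈ Finset.Ico i arr.length, ∑ j ∈ Finset.range arr.length,
          ∑ k ∈ Finset.range arr.length, pvInd arr a b c ii j k := by
  intro i ans
  fun_induction pvLoopI arr a b c i ans with
  | case1 i ans h ih =>
      rw [ih, loopJ_eq, Finset.sum_eq_sum_Ico_succ_bot h]
      rw [Finset.range_eq_Ico]; ring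
  | case2 i ans h =>
      rw [Finset.Ico_eq_empty (by omega), Finset.sum_empty, add_zero]

theorem A_eq_sum (arr : List Int) (a b c : Int) :
    countGoodTriplets arr a b c
      = ∑ i ∈ Finset.range arr.length, ∑ j ∈ Finset.range arr.length,
          ∑ k ∈ Finset.range arr.length, pvInd arr a b c i j k := by
  unfold countGoodTriplets
  rw [loopI_eq, Finset.range_eq_Ico, zero_add]

-- ---------- counting via binary search on a sorted list ----------

theorem countP_boundary (p : Int → Bool) (s : List Int) (m : Nat) (hm : m ≤ s.length)
    (h1 : ∀ j (hj : j < s.length), j < m → p s[j] = true)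
    (h2 : ∀ j (hj : j < s.length), m ≤ j → p s[j] = false) :
    s.countP p = m := by
  have hsplit : s.countP p = (s.take m).countP p + (s.drop m).countP p := by
    rw [← List.countP_append, List.take_append_drop]
  have htake : (s.take m).countP p = (s.take m).length := by
    rw [List.countP_eq_length]
    intro x hx
    rcases List.mem_iff_getElem.1 hx with ⟨idx, hidx, rfl⟩
    rw [List.getElem_take]
    exact h1 idx (by simp at hidx; omega) (by simp at hidx; omega)
  have hdrop : (s.drop m).countP p = 0 := by
    rw [List.countP_eq_zero]
    intro x hx
    rcases List.mem_iff_getElem.1 hx with ⟨idx, hidx, rfl⟩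
    rw [List.getElem_drop]
    simp only [List.length_drop] at hidx
    simp [h2 (m + idx) (by omega) (by omega)]
  rw [hsplit, htake, hdrop, List.length_take]
  omega

theorem bl_count (s : List Int) (hs : s.Pairwise (· ≤ ·)) (x : Int) :
    PySem.List.bisectLeft s x = s.countP (fun v => decide (v < x)) := by
  obtain ⟨hle, hlt, hge⟩ := PySem.List.bisectLeft_spec s x hs
  symm
  refine countP_boundary _ s _ hle ?_ ?_
  · intro j hj hjm; simp [hlt j hj hjm]
  · intro j hj hjm; simp [not_lt.2 (hge j hj hjm)]

theorem br_count (s : List Int) (hs : s.Pairwise (· ≤ ·)) (x : Int) :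
    PySem.List.bisectRight s x = s.countP (fun v => decide (v ≤ x)) := by
  obtain ⟨hle, hlt, hge⟩ := PySem.List.bisectRight_spec s x hs
  symm
  refine countP_boundary _ s _ hle ?_ ?_
  · intro j hj hjm; simp [hlt j hj hjm]
  · intro j hj hjm; simp [not_le.2 (hge j hj hjm)]

theorem count_interval (s : List Int) (lo hi : Int) (h : lo ≤ hi) :
    s.countP (fun v => decide (v ≤ hi))
      = s.countP (fun v => decide (lo ≤ v) && decide (v ≤ hi)) + s.countP (fun v => decide (v < lo)) := by
  induction s with
  | nil => simp
  | cons v t ih =>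
      simp only [List.countP_cons, ih]
      split_ifs <;> simp_all <;> omega

theorem insort_perm (s : List Int) (v : Int) (pos : Nat) :
    (s.take pos ++ v :: s.drop pos).Perm (v :: s) := by
  refine List.perm_middle.trans ?_
  rw [List.take_append_drop]

theorem insort_sorted (s : List Int) (hs : s.Pairwise (· ≤ ·)) (v : Int) :
    (s.take (PySem.List.bisectLeft s v) ++ v :: s.drop (PySem.List.bisectLeft s v)).Pairwise (· ≤ ·) := by
  obtain ⟨hle, hlt, hge⟩ := PySem.List.bisectLeft_spec s v hs
  set pos := PySem.List.bisectLeft s v with hpos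
  have htake : ∀ x ∈ s.take pos, x < v := by
    intro x hx
    rcases List.mem_iff_getElem.1 hx with ⟨idx, hidx, rfl⟩
    rw [List.getElem_take]
    exact hlt idx (by simp at hidx; omega) (by simp at hidx; omega)
  have hdrop : ∀ x ∈ s.drop pos, v ≤ x := by
    intro x hx
    rcases List.mem_iff_getElem.1 hx with ⟨idx, hidx, rfl⟩
    rw [List.getElem_drop]
    simp only [List.length_drop] at hidx
    exact hge (pos + idx) (by omega) (by omega)
  rw [List.pairwise_append]
  refine ⟨hs.sublist (List.take_sublist _ _), ?_, ?_⟩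
  · exact List.pairwise_cons.2 ⟨hdrop, hs.sublist (List.drop_sublist _ _)⟩
  · intro x hx y hy
    rcases List.mem_cons.1 hy with rfl | hy
    · exact le_of_lt (htake x hx)
    · exact le_of_lt (lt_of_lt_of_le (htake x hx) (hdrop y hy))

-- ---------- B-side characterization ----------

theorem mapsum_range' (g : Nat → Int) : ∀ (a m : Nat),
    ((List.range' a m).map g).sum = ∑ k ∈ Finset.Ico a (a + m), g k := by
  intro a m
  induction m generalizing a with
  | zero => simp
  | succ m ih =>
      rw [List.range'_succ, List.map_cons, List.sum_cons, ih (a + 1),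
        Finset.sum_eq_sum_Ico_succ_bot (a := a) (b := a + (m + 1)) (by omega)]
      have h : a + 1 + m = a + (m + 1) := by omega
      rw [h]

theorem countP_take_sum (arr : List Int) (p : Int → Bool) :
    ∀ j, j ≤ arr.length → ((arr.take j).countP p : Int)
      = ∑ i ∈ Finset.range j, (if p (arr.getD i 0) then (1 : Int) else 0) := by
  intro j hj
  induction j with
  | zero => simp
  | succ m ih =>
      have hm : m < arr.length := by omega
      rw [Finset.sum_range_succ, ← ih (by omega), List.getD_eq_getElem arr 0 hm,
        List.take_add_one, List.getElem?_eq_getElem hm]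
      simp only [Option.toList_some, List.countP_append]
      push_cast
      congr 1
      simp only [List.countP_cons, List.countP_nil]
      split <;> simp

theorem inner_fold_eq (arr : List Int) (a b c : Int) (pre : List Int)
    (hsort : pre.Pairwise (· ≤ ·)) (j : Nat) (hperm : pre.Perm (arr.take j)) :
    ∀ (ans : Int), (List.range' (j + 1) (arr.length - (j + 1))).foldl (fun s k =>
        let vk := arr.getD k 0
        if |arr.getD j 0 - vk| ≤ b then
          let lo := max (arr.getD j 0 - a) (vk - c)
          let hi := min (arr.getD j 0 + a) (vk + c)
          if lo ≤ hi then
            s + ((PySem.List.bisectRight pre hi : Int) - (PySem.List.bisectLeft pre lo : Int))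
          else s
        else s) ans
      = ans + ∑ k ∈ Finset.Ico (j + 1) arr.length, pvBterm arr a b c j k := by
  intro ans
  have hext : ∀ (s : Int), ∀ k ∈ List.range' (j + 1) (arr.length - (j + 1)),
      (let vk := arr.getD k 0
       if |arr.getD j 0 - vk| ≤ b then
         let lo := max (arr.getD j 0 - a) (vk - c)
         let hi := min (arr.getD j 0 + a) (vk + c)
         if lo ≤ hi then
           s + ((PySem.List.bisectRight pre hi : Int) - (PySem.List.bisectLeft pre lo : Int))
         else s
       else s) = s + pvBterm arr a b c j k := by
    intro s k _
    simp only
    by_cases hb : |arr.getD j 0 - arr.getD k 0| ≤ b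
    · rw [if_pos hb]
      unfold pvBterm
      rw [if_pos hb]
      by_cases hlohi : max (arr.getD j 0 - a) (arr.getD k 0 - c)
          ≤ min (arr.getD j 0 + a) (arr.getD k 0 + c)
      · rw [if_pos hlohi, br_count pre hsort, bl_count pre hsort,
          hperm.countP_eq, hperm.countP_eq,
          count_interval (arr.take j) _ _ hlohi]
        push_cast
        ring
      · rw [if_neg hlohi]
        have h0 : (arr.take j).countP (fun v =>
            decide (max (arr.getD j 0 - a) (arr.getD k 0 - c) ≤ v) &&
            decide (v ≤ min (arr.getD j 0 + a) (arr.getD k 0 + c))) = 0 := by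
          rw [List.countP_eq_zero]
          intro x _
          simp only [Bool.and_eq_true, decide_eq_true_eq, not_and]
          intro h1 h2
          exact absurd (le_trans h1 h2) hlohi
        rw [h0]
        simp
    · rw [if_neg hb]
      unfold pvBterm
      rw [if_neg hb, add_zero]
  rw [List.foldl_ext _ (fun s k => s + pvBterm arr a b c j k) ans hext,
    PySem.List.foldl_add, mapsum_range']
  congr 1
  by_cases h : j + 1 ≤ arr.length
  · rw [Nat.add_sub_cancel' h]
  · rw [Finset.Ico_eq_empty (by omega), Finset.Ico_eq_empty (by omega)]

theorem outer_inv (arr : List Int) (a b c : Int) :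
    ∀ m, m ≤ arr.length →
      ((List.range m).foldl (pvStep arr a b c) ((0 : Int), ([] : List Int))).1
          = (∑ j ∈ Finset.range m, ∑ k ∈ Finset.Ico (j + 1) arr.length, pvBterm arr a b c j k)
        ∧ ((List.range m).foldl (pvStep arr a b c) ((0 : Int), ([] : List Int))).2.Pairwise (· ≤ ·)
        ∧ ((List.range m).foldl (pvStep arr a b c) ((0 : Int), ([] : List Int))).2.Perm (arr.take m) := by
  intro m
  induction m with
  | zero => simp
  | succ m ih =>
      intro hm1
      obtain ⟨h1, h2, h3⟩ := ih (by omega)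
      have hm : m < arr.length := by omega
      rw [List.range_succ, List.foldl_append, List.foldl_cons, List.foldl_nil]
      set st := (List.range m).foldl (pvStep arr a b c) ((0 : Int), ([] : List Int)) with hst
      refine ⟨?_, ?_, ?_⟩
      · show ((pvStep arr a b c st m).1 = _)
        unfold pvStep
        simp only
        rw [inner_fold_eq arr a b c st.2 h2 m h3, h1, Finset.sum_range_succ]
      · show ((pvStep arr a b c st m).2.Pairwise (· ≤ ·))
        unfold pvStep
        simp only
        exact insort_sorted st.2 h2 (arr.getD m 0)
      · show ((pvStep arr a b c st m).2.Perm (arr.take (m + 1)))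
        unfold pvStep
        simp only
        refine (insort_perm st.2 (arr.getD m 0) _).trans ?_
        rw [List.take_add_one, List.getElem?_eq_getElem hm, List.getD_eq_getElem arr 0 hm]
        simp only [Option.toList_some]
        exact (h3.cons (arr[m])).trans (List.perm_append_singleton arr[m] (arr.take m)).symm

-- ---------- the bridge ----------

theorem Bterm_eq_sum (arr : List Int) (a b c : Int) (j k : Nat)
    (hj : j < arr.length) (hjk : j < k) :
    pvBterm arr a b c j k = ∑ i ∈ Finset.range j, pvInd arr a b c i j k := by
  by_cases hb : |arr.getD j 0 - arr.getD k 0| ≤ b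
  · unfold pvBterm
    rw [if_pos hb, countP_take_sum arr _ j (le_of_lt hj)]
    refine Finset.sum_congr rfl ?_
    intro i hi
    have hij : i < j := Finset.mem_range.1 hi
    have hiff : (decide (max (arr.getD j 0 - a) (arr.getD k 0 - c) ≤ arr.getD i 0) &&
        decide (arr.getD i 0 ≤ min (arr.getD j 0 + a) (arr.getD k 0 + c))) = true
        ↔ pvGoodA arr a b c i j k = true := by
      have hb' := abs_le.1 hb
      simp only [pvGoodA, Bool.and_eq_true, decide_eq_true_eq, max_le_iff, le_min_iff, abs_le]
      constructor <;> intro h <;> omega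
    unfold pvInd
    rw [if_congr hiff rfl rfl]
  · unfold pvBterm
    rw [if_neg hb]
    symm
    refine Finset.sum_eq_zero ?_
    intro i _
    unfold pvInd pvGoodA
    simp only [List.getD_eq_getElem?_getD] at hb
    simp [hb]

theorem sums_agree (arr : List Int) (a b c : Int) :
    (∑ i ∈ Finset.range arr.length, ∑ j ∈ Finset.range arr.length,
        ∑ k ∈ Finset.range arr.length, pvInd arr a b c i j k)
      = ∑ j ∈ Finset.range arr.length, ∑ k ∈ Finset.Ico (j + 1) arr.length, pvBterm arr a b c j k := by
  rw [Finset.sum_comm]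
  refine Finset.sum_congr rfl ?_
  intro j hj
  have hjn : j < arr.length := Finset.mem_range.1 hj
  rw [Finset.sum_comm]
  have hk : ∀ k ∈ Finset.Ico (j + 1) arr.length,
      pvBterm arr a b c j k = ∑ i ∈ Finset.range arr.length, pvInd arr a b c i j k := by
    intro k hk
    have hjk : j < k := (Finset.mem_Ico.1 hk).1
    rw [Bterm_eq_sum arr a b c j k hjn hjk]
    have hsub : Finset.range j ⊆ Finset.range arr.length := by
      intro x hx
      simp only [Finset.mem_range] at hx ⊢
      omega
    refine Finset.sum_subset hsub ?_
    intro i _ hi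
    have : ¬ i < j := by simpa [Finset.mem_range] using hi
    simp [pvInd, pvGoodA, this]
  rw [Finset.sum_congr rfl hk]
  symm
  refine Finset.sum_subset ?_ ?_
  · intro k hk
    exact Finset.mem_range.2 (Finset.mem_Ico.1 hk).2
  · intro k _ hk
    have : ¬ j < k := by
      intro h
      exact hk (Finset.mem_Ico.2 ⟨by omega, by simpa [Finset.mem_range] using ‹k ∈ Finset.range arr.length›⟩)
    refine Finset.sum_eq_zero ?_
    intro i _
    simp [pvInd, pvGoodA, this]

-- ===== VERDICT (by name: the statement is the Claim_ definition above) =====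
theorem countGoodTriplets_spec : Claim_equal_countGoodTriplets := by
  intro arr a b c _
  unfold Spec_countGoodTriplets
  rw [A_eq_sum, alt_eq_fold, (outer_inv arr a b c arr.length le_rfl).1, sums_agree]
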